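-- pv_equiv track=rewrite | github.com/mrkimkim/csi | kakao 2020/hyeongyu/p1.py | solution
-- ===== SOURCE A (Python) =====
-- def solution(s):
--     min_len = len(s)
--     for i in range(1, len(s)):
--         length = 0
--         prev = ""
--         idx = 0
--         while idx < len(s):
--             token = s[idx:min(idx+i, len(s))]
--             idx += len(token)
--             cnt = 1
--             length += len(token)
--             while idx + i <= len(s) and token == s[idx:idx + i]:
--                 idx += i
--                 cnt += 1
--             if cnt > 1:
--                 length += len(str(cnt))
--         if length < min_len:
--             min_len = length
--     return min_len
-- ===== SOURCE B (Python) =====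
-- def solution(s):
--     # Character-level DP: for each width i, lcp[p] = length of the longest common
--     # prefix of s[p:] and s[p+i:]; a run of equal width-i chunks starting at p has
--     # 1 + lcp[p] // i chunks, so runs are skipped arithmetically without ever
--     # comparing or materialising chunks.
--     n = len(s)
--     best = n
--     for i in range(1, n):
--         lcp = [0] * (n + 1)
--         for p in range(n - i - 1, -1, -1):
--             lcp[p] = lcp[p + 1] + 1 if s[p] == s[p + i] else 0
--         total = 0
--         p = 0
--         while p < n:
--             if p + i <= n:
--                 t = lcp[p] // i
--             else:
--                 t = 0
--             total += min(i, n - p) + (len(str(t + 1)) if t > 0 else 0)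
--             p += (t + 1) * i
--         if total < best:
--             best = total
--     return best
-- ===== Notes on version B (the rewrite author's own statement) =====
-- stated objective: alternative
-- what changed: Instead of scanning and comparing chunk slices to count runs, B precomputes for each width i a character-level DP array lcp[p] (longest common prefix of s[p:] and s[p+i:]) by a right-to-left recurrence and derives every run count arithmetically as 1 + lcp[p] // i, jumping the walk pointer by whole runs without any chunk comparison; same O(n^2) asymptotics, but the per-character Python loop has a larger constant than A's C-level slice comparisons, so B is not faster in CPython.
import Mathlib
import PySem

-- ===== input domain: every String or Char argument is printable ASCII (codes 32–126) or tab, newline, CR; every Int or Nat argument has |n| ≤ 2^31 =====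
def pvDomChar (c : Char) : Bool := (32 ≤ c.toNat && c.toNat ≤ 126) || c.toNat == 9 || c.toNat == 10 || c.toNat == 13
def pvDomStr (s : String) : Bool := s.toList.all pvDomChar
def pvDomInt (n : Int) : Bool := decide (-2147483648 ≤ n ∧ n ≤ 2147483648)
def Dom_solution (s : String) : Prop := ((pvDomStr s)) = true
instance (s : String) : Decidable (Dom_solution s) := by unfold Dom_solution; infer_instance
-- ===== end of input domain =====

-- B replaces A's chunk-slicing run scanner by a character-level DP: for each
-- width i it precomputes lcp[p] (longest common prefix of s[p:] and s[p+i:])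
-- by a right-to-left recurrence, then derives each run count arithmetically as
-- 1 + lcp[p] // i, never comparing or materialising chunks (objective: alternative).

-- ===== PORT A =====
-- A's inner `while idx + i <= len(s) and token == s[idx:idx+i]` loop.
-- fuel is a totality guard only: it is called with more fuel than loop iterations.
def innerA (cs : List Char) (i : Int) (token : List Char) (fuel : Nat) (idx cnt : Int) :
    Int × Int :=
  match fuel with
  | 0 => (idx, cnt)
  | fuel + 1 =>
    if idx + i ≤ (cs.length : Int) ∧
        token = PySem.List.slice cs (some idx) (some (idx + i)) then
      innerA cs i token fuel (idx + i) (cnt + 1)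
    else
      (idx, cnt)

-- A's outer `while idx < len(s)` loop (fuel again a totality guard only).
def outerA (cs : List Char) (i : Int) (fuel : Nat) (idx length : Int) : Int :=
  match fuel with
  | 0 => length
  | fuel + 1 =>
    if idx < (cs.length : Int) then
      let token := PySem.List.slice cs (some idx) (some (min (idx + i) (cs.length : Int)))
      let p := innerA cs i token (cs.length + 1) (idx + (token.length : Int)) 1
      outerA cs i fuel p.1
        (length + (token.length : Int) +
          (if 1 < p.2 then (PySem.Str.len (PySem.Int.toStr p.2)) else 0))
    else
      length

def solution (s : String) : Int :=
  let cs := s.toList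
  (PySem.List.pyRange 1 (cs.length : Int) 1).foldl
    (fun min_len i =>
      let length := outerA cs i (cs.length + 1) 0 0
      if length < min_len then length else min_len)
    (cs.length : Int)

-- ===== PORT B =====
-- Source B's `lcp = [0]*(n+1); for p in range(n-i-1, -1, -1): lcp[p] = lcp[p+1]+1 if s[p]==s[p+i] else 0`.
-- The loop bounds keep p, p+i inside s and p, p+1 inside lcp, so the plain
-- Python indexing is ported exactly by getD (the defaults are never read).
def buildLcp (cs : List Char) (i : Int) : List Int :=
  (PySem.List.pyRange ((cs.length : Int) - i - 1) (-1) (-1)).foldl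
    (fun lcp p =>
      lcp.set p.toNat
        (if cs.getD p.toNat ' ' == cs.getD (p + i).toNat ' ' then
          lcp.getD (p + 1).toNat 0 + 1 else 0))
    (List.replicate (cs.length + 1) 0)

-- Source B's `while p < n` walk; fuel is a totality guard only (p grows by ≥ i ≥ 1).
def walkB (lcp : List Int) (n i : Int) (fuel : Nat) (p total : Int) : Int :=
  match fuel with
  | 0 => total
  | fuel + 1 =>
    if p < n then
      let t := if p + i ≤ n then PySem.Int.floordiv (lcp.getD p.toNat 0) i else 0
      walkB lcp n i fuel (p + (t + 1) * i)
        (total + min i (n - p) +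
          (if 0 < t then (PySem.Str.len (PySem.Int.toStr (t + 1))) else 0))
    else total

def solution_alt (s : String) : Int :=
  let cs := s.toList
  (PySem.List.pyRange 1 (cs.length : Int) 1).foldl
    (fun best i =>
      let total := walkB (buildLcp cs i) (cs.length : Int) i (cs.length + 1) 0 0
      if total < best then total else best)
    (cs.length : Int)

-- ===== PRECONDITION & SPEC =====
def Spec_solution (s : String) (out : Int) : Prop := out = solution_alt s
instance (s : String) (out : Int) : Decidable (Spec_solution s out) := by
  unfold Spec_solution; infer_instance

-- ===== CLAIM (what is proved, stated in full; the proofs are below) =====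
def Claim_equal_solution : Prop := ∀ (s : String), Dom_solution s → Spec_solution s (solution s)

-- ===== LEMMAS AND PROOFS =====

theorem pyRange_nil_of_pos (a b i : Int) (hi : 0 < i) (h : b ≤ a) :
    PySem.List.pyRange a b i = [] := by
  unfold PySem.List.pyRange
  rw [if_neg (by omega : ¬ i = 0)]
  simp only [if_pos hi, if_neg (by omega : ¬ a < b)]
  simp

theorem pyRange_cons_of_pos (a b i : Int) (hi : 0 < i) (hab : a < b) :
    PySem.List.pyRange a b i = a :: PySem.List.pyRange (a + i) b i := by
  unfold PySem.List.pyRange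
  rw [if_neg (by omega : ¬ i = 0), if_neg (by omega : ¬ i = 0)]
  simp only [if_pos hi, if_pos hab]
  have key : ((b - a + i - 1) / i) = (b - a - 1) / i + 1 := by
    have : b - a + i - 1 = (b - a - 1) + 1 * i := by ring
    rw [this, Int.add_mul_ediv_right _ _ (by omega : i ≠ 0)]
  have hnn : 0 ≤ (b - a - 1) / i := Int.ediv_nonneg (by omega) (by omega)
  have hcount : ((b - a + i - 1) / i).toNat = ((b - a - 1) / i).toNat + 1 := by
    omega
  rw [hcount, List.range_succ_eq_map]
  simp only [List.map_cons, List.map_map]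
  congr 1
  · simp
  · by_cases hab' : a + i < b
    · rw [if_pos hab']
      have : b - (a + i) + i - 1 = b - a - 1 := by ring
      rw [this]
      apply List.map_congr_left
      intro k _
      simp [Function.comp]
      ring
    · rw [if_neg hab']
      have : (b - a - 1) / i = 0 := Int.ediv_eq_zero_of_lt (by omega) (by omega)
      simp [this]

theorem pyRange_negone_nil (a b : Int) (h : a ≤ b) :
    PySem.List.pyRange a b (-1) = [] := by
  unfold PySem.List.pyRange
  rw [if_neg (by omega : ¬ (-1 : Int) = 0)]
  simp only [if_neg (by omega : ¬ (0:Int) < -1), if_neg (by omega : ¬ b < a)]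
  simp

theorem pyRange_negone_cons (a b : Int) (hab : b < a) :
    PySem.List.pyRange a b (-1) = a :: PySem.List.pyRange (a - 1) b (-1) := by
  unfold PySem.List.pyRange
  rw [if_neg (by omega : ¬ (-1 : Int) = 0), if_neg (by omega : ¬ (-1 : Int) = 0)]
  simp only [if_neg (by omega : ¬ (0:Int) < -1), if_pos hab]
  have e1 : (a - b + - -1 - 1) / - -1 = a - b := by norm_num
  have hcount : ((a - b + - -1 - 1) / - -1).toNat = (a - b - 1).toNat + 1 := by
    rw [e1]; omega
  rw [hcount, List.range_succ_eq_map]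
  simp only [List.map_cons, List.map_map]
  congr 1
  · simp
  · by_cases hab' : b < a - 1
    · rw [if_pos hab']
      have e2 : (a - 1 - b + - -1 - 1) / - -1 = a - 1 - b := by norm_num
      have : ((a - 1 - b + - -1 - 1) / - -1).toNat = (a - b - 1).toNat := by rw [e2]; omega
      rw [this]
      apply List.map_congr_left
      intro k _
      simp [Function.comp]
      ring
    · rw [if_neg hab']
      have : (a - b - 1).toNat = 0 := by omega
      simp [this]

-- chunks of size i starting at index idx (proof-side generalisation of the chunk list)
def chunksFrom (cs : List Char) (i idx : Int) : List (List Char) :=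
  (PySem.List.pyRange idx (cs.length : Int) i).map
    (fun j => PySem.List.slice cs (some j) (some (j + i)))

-- run-length encoding of adjacent equal chunks (proof-side common spec)
def rleB (xs : List (List Char)) : List (List Char × Int) :=
  match xs with
  | [] => []
  | x :: rest =>
      (x, 1 + ((rest.takeWhile (· == x)).length : Int)) :: rleB (rest.dropWhile (· == x))
termination_by xs.length
decreasing_by
  exact Nat.lt_succ_of_le (List.length_dropWhile_le _ _)

-- length contributed by one run-length group (key, count)
def groupCost (kc : List Char × Int) : Int :=
  (kc.1.length : Int) + (if 1 < kc.2 then (PySem.Str.len (PySem.Int.toStr kc.2)) else 0)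

theorem chunksFrom_nil (cs : List Char) (i idx : Int) (hi : 0 < i)
    (h : (cs.length : Int) ≤ idx) : chunksFrom cs i idx = [] := by
  unfold chunksFrom
  rw [pyRange_nil_of_pos _ _ _ hi h]
  rfl

theorem chunksFrom_cons (cs : List Char) (i idx : Int) (hi : 0 < i)
    (h : idx < (cs.length : Int)) :
    chunksFrom cs i idx =
      PySem.List.slice cs (some idx) (some (idx + i)) :: chunksFrom cs i (idx + i) := by
  unfold chunksFrom
  rw [pyRange_cons_of_pos _ _ _ hi h]
  rfl

theorem slice_min_eq (cs : List Char) (i idx : Int) (h0 : 0 ≤ idx) (hi : 0 ≤ i) :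
    PySem.List.slice cs (some idx) (some (min (idx + i) (cs.length : Int)))
      = PySem.List.slice cs (some idx) (some (idx + i)) := by
  rw [PySem.List.slice_toNat cs h0 (by omega), PySem.List.slice_toNat cs h0 (by omega)]
  rw [List.take_eq_take_iff]
  simp
  omega

theorem slice_len_full (cs : List Char) (i idx : Int) (h0 : 0 ≤ idx)
    (h : idx + i ≤ (cs.length : Int)) (hi : 0 ≤ i) :
    ((PySem.List.slice cs (some idx) (some (idx + i))).length : Int) = i := by
  rw [PySem.List.length_slice,
    PySem.List.clampIdx_of_nonneg_of_le h0 (by omega),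
    PySem.List.clampIdx_of_nonneg_of_le (by omega) (by omega)]
  omega

theorem slice_len_partial (cs : List Char) (i idx : Int) (h0 : 0 ≤ idx)
    (hl : idx ≤ (cs.length : Int)) (h : (cs.length : Int) ≤ idx + i) :
    ((PySem.List.slice cs (some idx) (some (idx + i))).length : Int) = (cs.length : Int) - idx := by
  rw [PySem.List.length_slice,
    PySem.List.clampIdx_of_nonneg_of_le h0 hl,
    PySem.List.clampIdx_of_nonneg (by omega : (0:Int) ≤ idx + i)]
  omega

theorem innerA_eq (cs : List Char) (i : Int) (token : List Char) (hi : 0 < i)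
    (htl : (token.length : Int) = i) :
    ∀ (fuel : Nat) (idx cnt : Int), 0 ≤ idx →
      ((cs.length : Int) - idx).toNat < fuel →
    innerA cs i token fuel idx cnt
      = (idx + i * (((chunksFrom cs i idx).takeWhile (· == token)).length : Int),
         cnt + (((chunksFrom cs i idx).takeWhile (· == token)).length : Int))
    ∧ chunksFrom cs i (idx + i * (((chunksFrom cs i idx).takeWhile (· == token)).length : Int))
        = (chunksFrom cs i idx).dropWhile (· == token) := by
  intro fuel
  induction fuel with
  | zero =>
    intro idx cnt h0 hf
    omega
  | succ fuel ih =>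
    intro idx cnt h0 hf
    by_cases hg : idx + i ≤ (cs.length : Int) ∧
        token = PySem.List.slice cs (some idx) (some (idx + i))
    · obtain ⟨hle, htok⟩ := hg
      have hlt : idx < (cs.length : Int) := by omega
      have hcons := chunksFrom_cons cs i idx hi hlt
      have hhead : (PySem.List.slice cs (some idx) (some (idx + i)) == token) = true := by
        simp [htok]
      obtain ⟨ih1, ih2⟩ := ih (idx + i) (cnt + 1) (by omega) (by omega)
      have hstep : innerA cs i token (fuel + 1) idx cnt
          = innerA cs i token fuel (idx + i) (cnt + 1) := by
        rw [innerA, if_pos ⟨hle, htok⟩]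
      have harith : ∀ m : Nat, idx + i * ((m + 1 : Nat) : Int) = (idx + i) + i * (m : Int) := by
        intro m; push_cast; ring
      rw [hcons]
      simp only [List.takeWhile_cons, List.dropWhile_cons, hhead, if_true, List.length_cons]
      refine ⟨?_, ?_⟩
      · rw [hstep, ih1, harith]
        have : cnt + 1 + (((chunksFrom cs i (idx + i)).takeWhile (· == token)).length : Int)
            = cnt + (((chunksFrom cs i (idx + i)).takeWhile (· == token)).length + 1 : Nat) := by
          push_cast; ring
        rw [this]
      · rw [harith, ih2]
    · -- loop guard fails
      have hstop : innerA cs i token (fuel + 1) idx cnt = (idx, cnt) := by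
        rw [innerA, if_neg hg]
      have hk : ((chunksFrom cs i idx).takeWhile (· == token)) = [] := by
        by_cases hlt : idx < (cs.length : Int)
        · rw [chunksFrom_cons cs i idx hi hlt]
          have hne : (PySem.List.slice cs (some idx) (some (idx + i)) == token) = false := by
            by_cases hc : idx + i ≤ (cs.length : Int)
            · have : token ≠ PySem.List.slice cs (some idx) (some (idx + i)) := by tauto
              simp
              exact fun hh => this hh.symm
            · have hl := slice_len_partial cs i idx h0 (by omega) (by omega)
              simp
              intro hh
              rw [← hh] at htl
              omega
          simp [hne]
        · rw [chunksFrom_nil cs i idx hi (by omega)]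
          rfl
      have hd : (chunksFrom cs i idx).dropWhile (· == token) = chunksFrom cs i idx := by
        cases hcf : chunksFrom cs i idx with
        | nil => rfl
        | cons y ys =>
          rw [hcf] at hk
          simp only [List.takeWhile_cons] at hk
          rcases hb : (y == token) with _ | _
          · simp [hb]
          · rw [hb] at hk; simp at hk
      rw [hk, hd]
      simp [hstop]

theorem outerA_eq (cs : List Char) (i : Int) (hi : 0 < i) :
    ∀ (fuel : Nat) (idx L : Int), 0 ≤ idx → ((cs.length : Int) - idx).toNat < fuel →
    outerA cs i fuel idx L = L + ((rleB (chunksFrom cs i idx)).map groupCost).sum := by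
  intro fuel
  induction fuel with
  | zero =>
    intro idx L h0 hf
    omega
  | succ fuel ih =>
    intro idx L h0 hf
    by_cases hlt : idx < (cs.length : Int)
    · have hts := slice_min_eq cs i idx h0 (by omega)
      have hcons := chunksFrom_cons cs i idx hi hlt
      rw [outerA, if_pos hlt]
      simp only [hts]
      by_cases hfull : idx + i ≤ (cs.length : Int)
      · have hlen := slice_len_full cs i idx h0 hfull (by omega)
        obtain ⟨ih1, ih2⟩ := innerA_eq cs i
          (PySem.List.slice cs (some idx) (some (idx + i))) hi hlen
          (cs.length + 1) (idx + i) 1 (by omega) (by omega)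
        have hidx1 : idx + (((PySem.List.slice cs (some idx) (some (idx + i))).length : Nat) : Int)
            = idx + i := by omega
        rw [hidx1, ih1]
        have hknn : (0:Int) ≤ i * ((((chunksFrom cs i (idx + i)).takeWhile
            (· == PySem.List.slice cs (some idx) (some (idx + i)))).length : Nat) : Int) := by
          positivity
        have hrec := ih
          (idx + i + i * ((((chunksFrom cs i (idx + i)).takeWhile
            (· == PySem.List.slice cs (some idx) (some (idx + i)))).length : Nat) : Int))
          (L + (((PySem.List.slice cs (some idx) (some (idx + i))).length : Nat) : Int) +
            (if 1 < 1 + ((((chunksFrom cs i (idx + i)).takeWhile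
                (· == PySem.List.slice cs (some idx) (some (idx + i)))).length : Nat) : Int) then
              (PySem.Str.len (PySem.Int.toStr (1 + ((((chunksFrom cs i (idx + i)).takeWhile
                (· == PySem.List.slice cs (some idx) (some (idx + i)))).length : Nat) : Int)))) else 0))
          (by omega) (by omega)
        rw [hrec, ih2, hcons]
        simp only [rleB, List.map_cons, List.sum_cons, groupCost]
        omega
      · have hlen := slice_len_partial cs i idx h0 (by omega) (by omega)
        have hidx1 : idx + (((PySem.List.slice cs (some idx) (some (idx + i))).length : Nat) : Int)
            = (cs.length : Int) := by omega
        have hstop : innerA cs i (PySem.List.slice cs (some idx) (some (idx + i)))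
            (cs.length + 1) (cs.length : Int) 1 = ((cs.length : Int), 1) := by
          cases hcl : cs.length with
          | zero => omega
          | succ m =>
            rw [innerA, if_neg]
            intro hcontra
            omega
        rw [hidx1, hstop]
        have hrec := ih (cs.length : Int)
          (L + (((PySem.List.slice cs (some idx) (some (idx + i))).length : Nat) : Int) +
            (if (1:Int) < 1 then (PySem.Str.len (PySem.Int.toStr 1)) else 0))
          (by omega) (by omega)
        rw [hrec, chunksFrom_nil cs i (cs.length : Int) hi (by omega), hcons,
          chunksFrom_nil cs i (idx + i) hi (by omega)]
        simp only [rleB, List.map_cons, List.map_nil, List.sum_cons, List.sum_nil, groupCost]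
        have hnil : rleB [] = [] := by rw [rleB]
        simp [hnil]
    · rw [outerA, if_neg hlt]
      rw [chunksFrom_nil cs i idx hi (by omega), rleB]
      simp

-- ===== B-side lemmas =====

-- mathematical model of Source B's lcp array: longest common prefix of cs[p:] and cs[p+i:]
def lcpM (cs : List Char) (i p : Nat) : Nat :=
  if h : p + i < cs.length ∧ 0 < i then
    if cs.getD p ' ' == cs.getD (p + i) ' ' then lcpM cs i (p + 1) + 1 else 0
  else 0
termination_by cs.length - p
decreasing_by omega

theorem lcpM_bound (cs : List Char) (i : Nat) (hi : 0 < i) :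
    ∀ (k p : Nat), cs.length - p ≤ k → p + i ≤ cs.length →
      p + i + lcpM cs i p ≤ cs.length := by
  intro k
  induction k with
  | zero => intro p hk hpi; rw [lcpM]; rw [dif_neg (by omega)]; omega
  | succ k ih =>
    intro p hk hpi
    rw [lcpM]
    by_cases h : p + i < cs.length ∧ 0 < i
    · rw [dif_pos h]
      have := ih (p + 1) (by omega) (by omega)
      split_ifs <;> omega
    · rw [dif_neg h]; omega

theorem lcp_ge_iff (cs : List Char) (i : Nat) (hi : 0 < i) :
    ∀ (k p : Nat), p + i ≤ cs.length →
      (k ≤ lcpM cs i p ↔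
        p + i + k ≤ cs.length ∧ ∀ j < k, cs.getD (p + j) ' ' = cs.getD (p + i + j) ' ') := by
  intro k
  induction k with
  | zero =>
    intro p hpi
    simp only [Nat.zero_le, true_iff, Nat.not_lt_zero, false_implies, implies_true, and_true]
    omega
  | succ k ih =>
    intro p hpi
    rw [lcpM]
    by_cases h : p + i < cs.length ∧ 0 < i
    · rw [dif_pos h]
      by_cases hm : (cs.getD p ' ' == cs.getD (p + i) ' ') = true
      · rw [if_pos hm]
        have heq : cs.getD p ' ' = cs.getD (p + i) ' ' := by simpa using hm
        have IH := ih (p + 1) (by omega)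
        constructor
        · intro hk
          obtain ⟨hb, hall⟩ := IH.mp (by omega : k ≤ lcpM cs i (p + 1))
          refine ⟨by omega, ?_⟩
          intro j hj
          cases j with
          | zero => simpa using heq
          | succ m =>
            have hm' := hall m (by omega)
            have e1 : p + (m + 1) = p + 1 + m := by omega
            have e2 : p + i + (m + 1) = p + 1 + i + m := by omega
            rw [e1, e2]
            exact hm'
        · rintro ⟨hb, hall⟩
          have hk' : k ≤ lcpM cs i (p + 1) := by
            refine IH.mpr ⟨by omega, ?_⟩
            intro m hmk
            have := hall (m + 1) (by omega)
            have e1 : p + (m + 1) = p + 1 + m := by omega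
            have e2 : p + i + (m + 1) = p + 1 + i + m := by omega
            rw [e1, e2] at this
            exact this
          omega
      · rw [if_neg hm]
        constructor
        · omega
        · rintro ⟨hb, hall⟩
          exfalso
          apply hm
          have h0 := hall 0 (by omega)
          simp only [Nat.add_zero] at h0
          simp only [beq_iff_eq]
          exact h0
    · rw [dif_neg h]
      have hnl : ¬ (p + i < cs.length) := fun hc => h ⟨hc, hi⟩
      constructor
      · omega
      · rintro ⟨hb, _⟩
        omega

theorem lcp_shift (cs : List Char) (i : Nat) :
    ∀ (k p : Nat), k ≤ lcpM cs i p → lcpM cs i p = k + lcpM cs i (p + k) := by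
  intro k
  induction k with
  | zero => intro p _; simp
  | succ k ih =>
    intro p hk
    rw [lcpM] at hk ⊢
    by_cases h : p + i < cs.length ∧ 0 < i
    · rw [dif_pos h] at hk ⊢
      by_cases hm : (cs.getD p ' ' == cs.getD (p + i) ' ') = true
      · rw [if_pos hm] at hk ⊢
        have := ih (p + 1) (by omega)
        have harr : p + (k + 1) = p + 1 + k := by omega
        rw [harr]
        omega
      · rw [if_neg hm] at hk; omega
    · rw [dif_neg h] at hk; omega

-- chunk equality of adjacent full chunks = lcp ≥ i
theorem chunk_eq_iff (cs : List Char) (i p : Nat) (hi : 0 < i)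
    (h2 : p + 2 * i ≤ cs.length) :
    (PySem.List.slice cs (some ((p : Int) + (i : Int))) (some ((p : Int) + (i : Int) + (i : Int)))
        = PySem.List.slice cs (some (p : Int)) (some ((p : Int) + (i : Int))))
      ↔ i ≤ lcpM cs i p := by
  have hpi : p + i ≤ cs.length := by omega
  rw [lcp_ge_iff cs i hi i p hpi]
  have e1 : ((p : Int) + (i : Int)).toNat = p + i := by omega
  have e2 : ((p : Int) + (i : Int) + (i : Int)).toNat = p + i + i := by omega
  have e3 : ((p : Int)).toNat = p := by omega
  rw [PySem.List.slice_toNat cs (by omega) (by omega),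
    PySem.List.slice_toNat cs (by omega) (by omega), e1, e2, e3]
  have elen : p + i + i - (p + i) = i := by omega
  have elen2 : p + i - p = i := by omega
  rw [elen, elen2]
  have hld : (List.drop (p + i) cs).length = cs.length - (p + i) := List.length_drop
  have hld2 : (List.drop p cs).length = cs.length - p := List.length_drop
  have hlt : ((List.drop (p + i) cs).take i).length = i := by
    rw [List.length_take, hld]; omega
  have hlt2 : ((List.drop p cs).take i).length = i := by
    rw [List.length_take, hld2]; omega
  constructor
  · intro hsl
    refine ⟨by omega, ?_⟩
    intro j hj
    have hj1 : j < ((List.drop (p + i) cs).take i).length := by omega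
    have hj2 : j < ((List.drop p cs).take i).length := by omega
    have hgg := List.getElem_of_eq hsl hj1
    rw [List.getElem_take, List.getElem_drop, List.getElem_take, List.getElem_drop] at hgg
    rw [List.getD_eq_getElem cs ' ' (by omega : p + j < cs.length),
      List.getD_eq_getElem cs ' ' (by omega : p + i + j < cs.length)]
    exact hgg.symm
  · rintro ⟨_, hall⟩
    apply List.ext_getElem (by omega)
    intro j hj1 hj2
    rw [List.getElem_take, List.getElem_drop, List.getElem_take, List.getElem_drop]
    have := hall j (by omega)
    rw [List.getD_eq_getElem cs ' ' (by omega : p + j < cs.length),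
      List.getD_eq_getElem cs ' ' (by omega : p + i + j < cs.length)] at this
    exact this.symm

-- the run of chunks equal to the chunk at p, counted by the lcp quotient
theorem runLen (cs : List Char) (i : Nat) (hi : 0 < i) :
    ∀ (k p : Nat), cs.length - p ≤ k → p + i ≤ cs.length →
    ((chunksFrom cs (i : Int) ((p : Int) + (i : Int))).takeWhile
        (· == PySem.List.slice cs (some (p : Int)) (some ((p : Int) + (i : Int))))).length
      = lcpM cs i p / i
    ∧ (chunksFrom cs (i : Int) ((p : Int) + (i : Int))).dropWhile
        (· == PySem.List.slice cs (some (p : Int)) (some ((p : Int) + (i : Int))))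
      = chunksFrom cs (i : Int) ((p : Int) + (i : Int) + ((lcpM cs i p / i : Nat) : Int) * (i : Int)) := by
  intro k
  induction k with
  | zero =>
    intro p hk hpi
    exact absurd hpi (by omega)
  | succ k ih =>
    intro p hk hpi
    by_cases hge : i ≤ lcpM cs i p
    · have hb := lcpM_bound cs i hi cs.length p (by omega) hpi
      have h2 : p + 2 * i ≤ cs.length := by omega
      have hlt' : (p : Int) + (i : Int) < (cs.length : Int) := by omega
      have hcons := chunksFrom_cons cs (i : Int) ((p : Int) + (i : Int)) (by omega) hlt'
      have hchunk := (chunk_eq_iff cs i p hi h2).mpr hge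
      have hhead : (PySem.List.slice cs (some ((p : Int) + (i : Int)))
          (some ((p : Int) + (i : Int) + (i : Int)))
          == PySem.List.slice cs (some (p : Int)) (some ((p : Int) + (i : Int)))) = true := by
        simp [hchunk]
      have hshift := lcp_shift cs i i p hge
      have hlcp' : lcpM cs i (p + i) = lcpM cs i p - i := by omega
      have IH := ih (p + i) (by omega) (by omega)
      have ecast : ((p + i : Nat) : Int) = (p : Int) + (i : Int) := by push_cast; ring
      rw [ecast] at IH
      rw [hchunk] at IH
      rw [hlcp'] at IH
      obtain ⟨IH1, IH2⟩ := IH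
      have hdiv : (lcpM cs i p - i) / i + 1 = lcpM cs i p / i := by
        rw [← Nat.add_div_right _ hi, Nat.sub_add_cancel hge]
      rw [hcons]
      simp only [List.takeWhile_cons, List.dropWhile_cons, hhead, if_true, List.length_cons]
      constructor
      · rw [IH1]; omega
      · rw [IH2]
        have hidx : (p : Int) + (i : Int) + (i : Int) + (((lcpM cs i p - i) / i : Nat) : Int) * (i : Int)
            = (p : Int) + (i : Int) + ((lcpM cs i p / i : Nat) : Int) * (i : Int) := by
          have : ((lcpM cs i p / i : Nat) : Int) = (((lcpM cs i p - i) / i : Nat) : Int) + 1 := by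
            rw [← hdiv]; push_cast; ring
          rw [this]; ring
        rw [hidx]
    · have ht0 : lcpM cs i p / i = Nat.zero := Nat.div_eq_of_lt (by omega)
      rw [ht0]
      simp only [Nat.zero_eq, Nat.cast_zero, zero_mul, add_zero]
      by_cases hend : (cs.length : Int) ≤ (p : Int) + (i : Int)
      · rw [chunksFrom_nil cs (i : Int) _ (by omega) hend]
        simp
      · have hcons := chunksFrom_cons cs (i : Int) ((p : Int) + (i : Int)) (by omega) (by omega)
        have hne : (PySem.List.slice cs (some ((p : Int) + (i : Int)))
            (some ((p : Int) + (i : Int) + (i : Int)))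
            == PySem.List.slice cs (some (p : Int)) (some ((p : Int) + (i : Int)))) = false := by
          simp only [beq_eq_false_iff_ne, ne_eq]
          intro hc
          by_cases h2 : p + 2 * i ≤ cs.length
          · exact hge ((chunk_eq_iff cs i p hi h2).mp hc)
          · have hl1 := slice_len_partial cs (i : Int) ((p : Int) + (i : Int))
              (by omega) (by omega) (by omega)
            have hl2 := slice_len_full cs (i : Int) (p : Int) (by omega) (by omega) (by omega)
            rw [hc, hl2] at hl1
            omega
        rw [hcons]
        simp only [List.takeWhile_cons, List.dropWhile_cons, hne, if_false,
          Bool.false_eq_true, List.length_nil]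
        exact ⟨trivial, trivial⟩

-- entries of the lcp array once the loop has gone down to (and including) index p0+1
def arrAt (cs : List Char) (i : Nat) (p0 : Int) : List Int :=
  (List.range (cs.length + 1)).map
    (fun (q : Nat) => if p0 < (q : Int) then ((lcpM cs i q : Nat) : Int) else 0)

theorem arrAt_length (cs : List Char) (i : Nat) (p0 : Int) :
    (arrAt cs i p0).length = cs.length + 1 := by simp [arrAt]

theorem arrAt_getElem (cs : List Char) (i : Nat) (p0 : Int) (q : Nat)
    (h : q < (arrAt cs i p0).length) :
    (arrAt cs i p0)[q] = if p0 < (q : Int) then ((lcpM cs i q : Nat) : Int) else 0 := by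
  simp [arrAt]

theorem lcpM_zero (cs : List Char) (i p : Nat) (h : cs.length ≤ p + i) :
    lcpM cs i p = 0 := by rw [lcpM, dif_neg (by omega)]

theorem replicate_eq_arrAt (cs : List Char) (i : Int) (hi : 0 < i) :
    (List.replicate (cs.length + 1) (0 : Int)) = arrAt cs i.toNat ((cs.length : Int) - i - 1) := by
  apply List.ext_getElem (by simp [arrAt])
  intro q h1 h2
  rw [List.getElem_replicate, arrAt_getElem]
  split_ifs with h
  · rw [lcpM_zero cs i.toNat q (by omega)]
    simp
  · rfl

theorem stepArr (cs : List Char) (i : Int) (hi : 0 < i) (p0 : Int) (h0 : 0 ≤ p0)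
    (hb : p0 + i + 1 ≤ (cs.length : Int)) :
    (arrAt cs i.toNat p0).set p0.toNat
      (if cs.getD p0.toNat ' ' == cs.getD (p0 + i).toNat ' ' then
        (arrAt cs i.toNat p0).getD (p0 + 1).toNat 0 + 1 else 0)
      = arrAt cs i.toNat (p0 - 1) := by
  have hget : (arrAt cs i.toNat p0).getD (p0 + 1).toNat 0
      = ((lcpM cs i.toNat (p0 + 1).toNat : Nat) : Int) := by
    have hlt : (p0 + 1).toNat < (arrAt cs i.toNat p0).length := by
      rw [arrAt_length]; omega
    rw [List.getD_eq_getElem _ _ hlt, arrAt_getElem]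
    rw [if_pos (by omega)]
  have hidx : (p0 + i).toNat = p0.toNat + i.toNat := by omega
  have hval : (if cs.getD p0.toNat ' ' == cs.getD (p0 + i).toNat ' ' then
        (arrAt cs i.toNat p0).getD (p0 + 1).toNat 0 + 1 else 0)
      = ((lcpM cs i.toNat p0.toNat : Nat) : Int) := by
    rw [hget, hidx]
    conv_rhs => rw [lcpM]
    rw [dif_pos ⟨by omega, by omega⟩]
    have h1 : p0.toNat + 1 = (p0 + 1).toNat := by omega
    split_ifs with hc
    · rw [h1]; push_cast; ring
    · rfl
  rw [hval]
  apply List.ext_getElem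
  · rw [List.length_set, arrAt_length, arrAt_length]
  · intro q h1 h2
    rw [List.getElem_set, arrAt_getElem]
    rw [arrAt_getElem cs i.toNat (p0 - 1) q (by rwa [arrAt_length] at h2 ⊢)]
    split_ifs with hq hlt hlt' <;> first | omega | (rw [hq])

theorem buildLoop (cs : List Char) (i : Int) (hi : 0 < i) :
    ∀ (k : Nat) (p0 : Int), (p0 + 1).toNat ≤ k → -1 ≤ p0 → p0 + i + 1 ≤ (cs.length : Int) →
    (PySem.List.pyRange p0 (-1) (-1)).foldl
      (fun lcp p => lcp.set p.toNat
        (if cs.getD p.toNat ' ' == cs.getD (p + i).toNat ' ' then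
          lcp.getD (p + 1).toNat 0 + 1 else 0))
      (arrAt cs i.toNat p0) = arrAt cs i.toNat (-1) := by
  intro k
  induction k with
  | zero =>
    intro p0 hk h1 hb
    have hp : p0 = -1 := by omega
    subst hp
    rw [pyRange_negone_nil _ _ (le_refl _)]
    rfl
  | succ k ih =>
    intro p0 hk h1 hb
    by_cases hp : p0 = -1
    · subst hp
      rw [pyRange_negone_nil _ _ (le_refl _)]
      rfl
    · have h0 : 0 ≤ p0 := by omega
      rw [pyRange_negone_cons p0 (-1) (by omega), List.foldl_cons]
      rw [stepArr cs i hi p0 h0 hb]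
      exact ih (p0 - 1) (by omega) (by omega) (by omega)

theorem buildLcp_eq (cs : List Char) (i : Int) (hi : 0 < i)
    (hin : i ≤ (cs.length : Int)) :
    buildLcp cs i = arrAt cs i.toNat (-1) := by
  unfold buildLcp
  rw [replicate_eq_arrAt cs i hi]
  exact buildLoop cs i hi ((cs.length : Int) - i).toNat ((cs.length : Int) - i - 1)
    (by omega) (by omega) (by omega)

theorem walkB_eq (cs : List Char) (i : Int) (hi : 0 < i) (hin : i ≤ (cs.length : Int)) :
    ∀ (fuel : Nat) (p total : Int), 0 ≤ p → ((cs.length : Int) - p).toNat < fuel →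
      walkB (buildLcp cs i) (cs.length : Int) i fuel p total
        = total + ((rleB (chunksFrom cs i p)).map groupCost).sum := by
  intro fuel
  induction fuel with
  | zero =>
    intro p total h0 hf
    omega
  | succ fuel ih =>
    intro p total h0 hf
    by_cases hp : p < (cs.length : Int)
    · rw [walkB, if_pos hp]
      have hcons := chunksFrom_cons cs i p hi hp
      by_cases hfull : p + i ≤ (cs.length : Int)
      · have hlcp : (buildLcp cs i).getD p.toNat 0
            = ((lcpM cs i.toNat p.toNat : Nat) : Int) := by
          rw [buildLcp_eq cs i hi hin]
          have hlt : p.toNat < (arrAt cs i.toNat (-1)).length := by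
            rw [arrAt_length]; omega
          rw [List.getD_eq_getElem _ _ hlt, arrAt_getElem, if_pos (by omega)]
        have hicast : ((i.toNat : Nat) : Int) = i := by omega
        have hcast : ((p.toNat : Nat) : Int) = p := by omega
        have ht : (if p + i ≤ (cs.length : Int) then
              PySem.Int.floordiv ((buildLcp cs i).getD p.toNat 0) i else 0)
            = ((lcpM cs i.toNat p.toNat / i.toNat : Nat) : Int) := by
          rw [if_pos hfull, hlcp, ← hicast, PySem.Int.floordiv_natCast]
          simp
        have hrl := runLen cs i.toNat (by omega) cs.length p.toNat (by omega) (by omega)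
        rw [hcast, hicast] at hrl
        obtain ⟨hrl1, hrl2⟩ := hrl
        have hmin : min i ((cs.length : Int) - p) = i := by omega
        have htok := slice_len_full cs i p h0 hfull (by omega)
        have hnn : (0 : Int) ≤ ((lcpM cs i.toNat p.toNat / i.toNat : Nat) : Int) := by positivity
        have hi1 : i ≤ (((lcpM cs i.toNat p.toNat / i.toNat : Nat) : Int) + 1) * i := by
          nlinarith
        have hrec := ih (p + (((lcpM cs i.toNat p.toNat / i.toNat : Nat) : Int) + 1) * i)
          (total + min i ((cs.length : Int) - p) +
            (if 0 < ((lcpM cs i.toNat p.toNat / i.toNat : Nat) : Int) then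
              (PySem.Str.len (PySem.Int.toStr
                (((lcpM cs i.toNat p.toNat / i.toNat : Nat) : Int) + 1))) else 0))
          (by nlinarith) (by omega)
        simp only [ht]
        rw [hrec, hcons]
        simp only [rleB, List.map_cons, List.sum_cons, groupCost, hrl1, hrl2]
        have hidx : p + i + ((lcpM cs i.toNat p.toNat / i.toNat : Nat) : Int) * i
            = p + (((lcpM cs i.toNat p.toNat / i.toNat : Nat) : Int) + 1) * i := by ring
        rw [hidx, hmin]
        have hcomm : ((lcpM cs i.toNat p.toNat / i.toNat : Nat) : Int) + 1
            = 1 + ((lcpM cs i.toNat p.toNat / i.toNat : Nat) : Int) := by ring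
        rw [hcomm]
        split_ifs with hc1 hc2 <;> omega
      · have hend : (cs.length : Int) ≤ p + i := by omega
        have hnil := chunksFrom_nil cs i (p + i) hi hend
        have htok := slice_len_partial cs i p h0 (by omega) hend
        have hmin : min i ((cs.length : Int) - p) = (cs.length : Int) - p := by omega
        rw [if_neg hfull]
        simp only [lt_irrefl, if_false, zero_add, one_mul, add_zero]
        have hrec := ih (p + i) (total + min i ((cs.length : Int) - p))
          (by omega) (by omega)
        rw [hrec, hcons, hnil]
        have hnil2 : rleB ([] : List (List Char)) = [] := by rw [rleB]
        simp only [rleB, hnil2, List.takeWhile_nil, List.dropWhile_nil, List.length_nil,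
          List.map_cons, List.map_nil, List.sum_cons, List.sum_nil, groupCost,
          Nat.cast_zero, add_zero, lt_irrefl, if_false]
        omega
    · rw [walkB, if_neg hp, chunksFrom_nil cs i p hi (by omega), rleB]
      simp

-- ===== VERDICT (by name: the statement is the Claim_ definition above) =====
theorem solution_spec : Claim_equal_solution := by
  intro s _
  unfold Spec_solution solution solution_alt
  apply PySem.List.foldl_congr_mem
  intro acc i hi
  obtain ⟨h1, h2⟩ := (PySem.List.mem_pyRange_one).mp hi
  have hA := outerA_eq s.toList i (by omega) (s.toList.length + 1) 0 0 (by omega) (by omega)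
  have hB := walkB_eq s.toList i (by omega) (by omega) (s.toList.length + 1) 0 0 (by omega) (by omega)
  rw [hA, hB]
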